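-- pv_equiv track=rewrite | github.com/MarcinSzablak/matura-info | 2024/maj/zad_3.py | zad_3_1
-- ===== SOURCE A (Python) =====
-- def zad_3_1(n):
--     m = 0
--     z = 1
--     while n > 0:
--         cyfra = n % 10
--         if cyfra % 2 != 0:
--             m = m + cyfra * z
--             z *= 10
--         n = n // 10
--
--     if m == 0:
--         return None
--
--     return m
-- ===== SOURCE B (Python) =====
-- def _odd_part(k):
--     # number formed by the odd digits of k (0 if there are none), built
--     # most-significant-first by structural recursion instead of a place multiplier
--     if k <= 0:
--         return 0
--     r = _odd_part(k // 10)
--     d = k % 10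
--     return 10 * r + d if d % 2 else r
--
--
-- def zad_3_1(n):
--     if n <= 0:
--         return None
--     m = _odd_part(n)
--     return m or None
-- ===== Notes on version B (the rewrite author's own statement) =====
-- stated objective: simpler
-- what changed: Replaces A's while loop with its pair of accumulators (running sum m and growing place multiplier z) by a guard-first structural recursion that builds the odd-digit number most-significant-first, appending each odd digit below the recursively built prefix, needing no multiplier state.
import Mathlib
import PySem

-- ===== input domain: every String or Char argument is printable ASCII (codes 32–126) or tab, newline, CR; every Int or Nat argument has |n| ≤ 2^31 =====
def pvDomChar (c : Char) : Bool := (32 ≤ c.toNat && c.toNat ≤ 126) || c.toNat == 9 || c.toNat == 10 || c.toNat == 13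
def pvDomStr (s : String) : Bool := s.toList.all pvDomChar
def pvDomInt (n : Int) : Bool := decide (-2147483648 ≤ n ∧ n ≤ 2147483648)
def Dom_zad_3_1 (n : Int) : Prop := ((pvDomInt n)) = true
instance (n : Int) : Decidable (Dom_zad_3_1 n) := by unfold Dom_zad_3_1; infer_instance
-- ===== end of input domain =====

-- B replaces A's while loop with its (m, z) accumulator pair by a guard-first
-- structural recursion that appends each odd digit below the recursively built prefix (objective: simpler).

-- ===== PORT A =====
-- the while loop of A, state (n, m, z)
def zad_3_1_loop (n m z : Int) : Int :=
  if h : n > 0 then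
    let cyfra := PySem.Int.mod n 10
    if PySem.Int.mod cyfra 2 ≠ 0 then
      zad_3_1_loop (PySem.Int.floordiv n 10) (m + cyfra * z) (z * 10)
    else
      zad_3_1_loop (PySem.Int.floordiv n 10) m z
  else m
termination_by n.toNat
decreasing_by
  all_goals
    rw [PySem.Int.floordiv_eq_ediv_of_pos (by norm_num : (0:Int) < 10)]
    omega

def zad_3_1 (n : Int) : Option Int :=
  let m := zad_3_1_loop n 0 1
  if m = 0 then none else some m

-- ===== PORT B =====
def oddPart (k : Int) : Int :=
  if h : k ≤ 0 then 0
  else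
    let r := oddPart (PySem.Int.floordiv k 10)
    let d := PySem.Int.mod k 10
    if PySem.Int.mod d 2 ≠ 0 then 10 * r + d else r
termination_by k.toNat
decreasing_by
  rw [PySem.Int.floordiv_eq_ediv_of_pos (by norm_num : (0:Int) < 10)]
  omega

def zad_3_1_alt (n : Int) : Option Int :=
  if n ≤ 0 then none
  else
    let m := oddPart n
    if m = 0 then none else some m

-- ===== PRECONDITION & SPEC =====
def Spec_zad_3_1 (n : Int) (out : Option Int) : Prop := out = zad_3_1_alt n
instance (n : Int) (out : Option Int) : Decidable (Spec_zad_3_1 n out) := by unfold Spec_zad_3_1; infer_instance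

-- ===== CLAIM (what is proved, stated in full; the proofs are below) =====
def Claim_equal_zad_3_1 : Prop := ∀ (n : Int), Dom_zad_3_1 n → Spec_zad_3_1 n (zad_3_1 n)

-- ===== LEMMAS AND PROOFS =====

lemma oddPart_nonpos {k : Int} (h : k ≤ 0) : oddPart k = 0 := by
  rw [oddPart]; simp [h]

-- loop invariant: A's loop computes m + z * oddPart n
lemma zad_3_1_loop_inv (n m z : Int) : zad_3_1_loop n m z = m + z * oddPart n := by
  by_cases h : n > 0
  · rw [zad_3_1_loop, oddPart]
    have ih := zad_3_1_loop_inv (PySem.Int.floordiv n 10)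
    simp only [h, dite_true, not_le.mpr h, dite_false, ih]
    split_ifs with hodd <;> ring
  · rw [zad_3_1_loop, oddPart]
    simp only [h, dite_false]
    have h' : n ≤ 0 := by omega
    simp [h']
termination_by n.toNat
decreasing_by
  all_goals
    rw [PySem.Int.floordiv_eq_ediv_of_pos (by norm_num : (0:Int) < 10)]
    omega

-- ===== VERDICT (by name: the statement is the Claim_ definition above) =====
theorem zad_3_1_spec : Claim_equal_zad_3_1 := by
  intro n _
  unfold Spec_zad_3_1 zad_3_1 zad_3_1_alt
  rw [zad_3_1_loop_inv]
  by_cases h : n ≤ 0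
  · simp [h, oddPart_nonpos h]
  · simp [h]
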